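-- pv_equiv track=rewrite | github.com/karthik110879/py-processor | code_parser/relationship_extractor.py | calculate_fan_in_fan_out
-- ===== SOURCE A (Python) =====
-- from typing import List, Dict, Any, Set, Tuple, Optional
--
-- def calculate_fan_in_fan_out(
--     modules: List[Dict[str, Any]],
--     edges: List[Dict[str, Any]]
-- ) -> Dict[str, Tuple[int, int]]:
--     """
--     Calculate fan-in and fan-out for each module.
--
--     Args:
--         modules: List of module dictionaries
--         edges: List of edge dictionaries
--
--     Returns:
--         Dictionary mapping module_id to (fan_in, fan_out) tuple
--     """
--     fan_stats = {m["id"]: [0, 0] for m in modules}  # [fan_in, fan_out]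
--
--     for edge in edges:
--         edge_type = edge.get("type")
--         if edge_type == "imports":
--             from_id = edge.get("from")
--             to_id = edge.get("to")
--             if from_id in fan_stats:
--                 fan_stats[from_id][1] += 1  # fan_out
--             if to_id in fan_stats:
--                 fan_stats[to_id][0] += 1  # fan_in
--
--     return {module_id: (stats[0], stats[1]) for module_id, stats in fan_stats.items()}
-- ===== SOURCE B (Python) =====
-- from typing import List, Dict, Any, Tuple
--
--
-- def calculate_fan_in_fan_out(
--     modules: List[Dict[str, Any]],
--     edges: List[Dict[str, Any]]
-- ) -> Dict[str, Tuple[int, int]]: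
--     # Brute force: for each module id, scan the edge list and count the
--     # 'imports' edges whose given endpoint is that id. No counting dict.
--     def degree(module_id, endpoint):
--         return sum(1 for e in edges
--                    if e.get("type") == "imports" and e.get(endpoint) == module_id)
--
--     return {m["id"]: (degree(m["id"], "to"), degree(m["id"], "from"))
--             for m in modules}
-- ===== Notes on version B (the rewrite author's own statement) =====
-- stated objective: alternative
-- what changed: A makes one pass over the edges, mutating [fan_in, fan_out] cells in a module-keyed dict; B keeps no counting structure at all and instead, for each module id, scans the edge list and counts matching 'imports' endpoints directly (nested scans).
import Mathlib
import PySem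

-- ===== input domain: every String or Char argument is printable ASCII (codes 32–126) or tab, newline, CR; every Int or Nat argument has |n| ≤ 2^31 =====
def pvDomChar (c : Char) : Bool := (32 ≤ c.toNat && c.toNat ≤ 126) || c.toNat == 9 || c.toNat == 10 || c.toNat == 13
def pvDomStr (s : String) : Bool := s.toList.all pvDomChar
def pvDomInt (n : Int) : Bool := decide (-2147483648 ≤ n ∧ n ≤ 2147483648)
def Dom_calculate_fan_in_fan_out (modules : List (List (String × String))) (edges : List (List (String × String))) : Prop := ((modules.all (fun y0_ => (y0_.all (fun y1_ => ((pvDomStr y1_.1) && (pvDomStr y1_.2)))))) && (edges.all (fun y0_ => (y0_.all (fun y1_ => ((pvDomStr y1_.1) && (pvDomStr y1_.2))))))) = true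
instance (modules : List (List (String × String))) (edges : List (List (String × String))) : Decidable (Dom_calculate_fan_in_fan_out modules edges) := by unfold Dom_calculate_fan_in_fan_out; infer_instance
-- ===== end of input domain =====

-- B keeps no counting structure: for each module id it scans the edge list and counts the
-- matching 'imports' endpoints directly, instead of A's single edge pass mutating a module-keyed dict.

-- ===== PORT A =====

-- d.get(k) on a Python dict given as an association list (first match)
def pvGetOpt (m : List (String × String)) (k : String) : Option String :=
  (PySem.Dict.mk m).get? k

-- one iteration of A's `for edge in edges` loop
def pvStepA (d : PySem.Dict String (Int × Int)) (e : List (String × String)) :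
    PySem.Dict String (Int × Int) :=
  if pvGetOpt e "type" = some "imports" then
    let d1 :=
      match pvGetOpt e "from" with
      | some f => if d.contains f then d.modify f (0, 0) (fun p => (p.1, p.2 + 1)) else d
      | none => d
    match pvGetOpt e "to" with
    | some t => if d1.contains t then d1.modify t (0, 0) (fun p => (p.1 + 1, p.2)) else d1
    | none => d1
  else d

def calculate_fan_in_fan_out (modules : List (List (String × String))) (edges : List (List (String × String))) : List (String × Int × Int) :=
  -- fan_stats = {m["id"]: [0, 0] for m in modules}   (m["id"] raises when absent: Pre_; the "" default is unreachable inside Pre_)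
  let fan_stats : PySem.Dict String (Int × Int) :=
    modules.foldl (fun d m => d.insert ((pvGetOpt m "id").getD "") ((0 : Int), (0 : Int))) PySem.Dict.empty
  let fan_stats := edges.foldl pvStepA fan_stats
  -- {module_id: (stats[0], stats[1]) for module_id, stats in fan_stats.items()}
  fan_stats.items.map (fun p => (p.1, (p.2.1, p.2.2)))

-- ===== PORT B =====

-- B's degree helper: sum(1 for e in edges if e.get("type") == "imports" and e.get(endpoint) == module_id)
def pvDegree (edges : List (List (String × String))) (module_id : String) (endpoint : String) : Int :=
  edges.foldl
    (fun acc e =>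
      if pvGetOpt e "type" = some "imports" ∧ pvGetOpt e endpoint = some module_id then acc + 1
      else acc) 0

def calculate_fan_in_fan_out_alt (modules : List (List (String × String))) (edges : List (List (String × String))) : List (String × Int × Int) :=
  -- {m["id"]: (degree(m["id"], "to"), degree(m["id"], "from")) for m in modules}
  (modules.foldl
    (fun d m =>
      let i := (pvGetOpt m "id").getD ""
      d.insert i (pvDegree edges i "to", pvDegree edges i "from"))
    PySem.Dict.empty).items

-- ===== PRECONDITION & SPEC =====
-- Pre_ excludes exactly the inputs where Python A raises KeyError: a module dict without the key "id" (B raises there too).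
def Pre_calculate_fan_in_fan_out (modules : List (List (String × String))) (edges : List (List (String × String))) : Prop :=
  modules.all (fun m => m.any (fun p => p.1 == "id")) = true
instance (modules : List (List (String × String))) (edges : List (List (String × String))) : Decidable (Pre_calculate_fan_in_fan_out modules edges) := by unfold Pre_calculate_fan_in_fan_out; infer_instance

def pvWitness_calculate_fan_in_fan_out : (List (List (String × String))) × (List (List (String × String))) :=
  ([[("id", "a")], [("id", "b")]],
   [[("type", "imports"), ("from", "a"), ("to", "b")], [("type", "calls"), ("from", "b"), ("to", "a")]])

def Spec_calculate_fan_in_fan_out (modules : List (List (String × String))) (edges : List (List (String × String))) (out : List (String × Int × Int)) : Prop := out = calculate_fan_in_fan_out_alt modules edges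
instance (modules : List (List (String × String))) (edges : List (List (String × String))) (out : List (String × Int × Int)) : Decidable (Spec_calculate_fan_in_fan_out modules edges out) := by unfold Spec_calculate_fan_in_fan_out; infer_instance

-- ===== CLAIM (what is proved, stated in full; the proofs are below) =====
def Claim_equal_calculate_fan_in_fan_out : Prop := ∀ (modules : List (List (String × String))) (edges : List (List (String × String))), Dom_calculate_fan_in_fan_out modules edges → Pre_calculate_fan_in_fan_out modules edges → Spec_calculate_fan_in_fan_out modules edges (calculate_fan_in_fan_out modules edges)

-- ===== LEMMAS AND PROOFS =====

theorem keys_pvStepA (d : PySem.Dict String (Int × Int)) (e : List (String × String)) :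
    (pvStepA d e).keys = d.keys := by
  unfold pvStepA
  split_ifs with h
  · rcases hf : pvGetOpt e "from" with _ | f <;>
    rcases ht : pvGetOpt e "to" with _ | t <;>
    simp only [] <;>
    split_ifs <;>
    simp_all [PySem.Dict.keys_modify, PySem.Dict.keys_insert_of_contains,
      PySem.Dict.contains_modify]
  · rfl

theorem contains_pvStepA (d : PySem.Dict String (Int × Int)) (e : List (String × String))
    (k : String) : (pvStepA d e).contains k = d.contains k := by
  rw [PySem.Dict.contains_eq_decide_mem_keys, PySem.Dict.contains_eq_decide_mem_keys,
    keys_pvStepA]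

theorem getD_pvStepA (d : PySem.Dict String (Int × Int)) (e : List (String × String))
    (k : String) (hk : d.contains k = true) :
    (pvStepA d e).getD k (0, 0) =
      ((d.getD k (0, 0)).1 +
        (if pvGetOpt e "type" = some "imports" ∧ pvGetOpt e "to" = some k then 1 else 0),
       (d.getD k (0, 0)).2 +
        (if pvGetOpt e "type" = some "imports" ∧ pvGetOpt e "from" = some k then 1 else 0)) := by
  unfold pvStepA
  by_cases h : pvGetOpt e "type" = some "imports"
  · simp only [h, if_true]
    rcases hf : pvGetOpt e "from" with _ | f <;>
    rcases ht : pvGetOpt e "to" with _ | t <;>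
    simp only [] <;>
    [skip; by_cases htk : t = k; by_cases hfk : f = k;
     (by_cases hfk : f = k <;> by_cases htk : t = k)] <;>
    split_ifs <;>
    simp_all [PySem.Dict.getD_modify, PySem.Dict.contains_modify, Prod.ext_iff] <;>
    (first
      | omega
      | (exact fun hh => by simp_all)
      | (split_ifs <;> simp_all))
  · simp [h]

theorem foldl_count_shift {α : Type} (p : α → Prop) [DecidablePred p]
    (es : List α) (a : Int) :
    es.foldl (fun acc e => if p e then acc + 1 else acc) a =
      a + es.foldl (fun acc e => if p e then acc + 1 else acc) 0 := by
  induction es generalizing a with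
  | nil => simp
  | cons e es ih =>
    simp only [List.foldl_cons]
    by_cases h : p e
    · rw [if_pos h, if_pos h, ih (a + 1), ih (0 + 1)]; ring
    · rw [if_neg h, if_neg h, ih a]

theorem foldA_getD (es : List (List (String × String))) (d : PySem.Dict String (Int × Int))
    (k : String) (hk : d.contains k = true) :
    (es.foldl pvStepA d).getD k (0, 0) =
      ((d.getD k (0, 0)).1 + pvDegree es k "to",
       (d.getD k (0, 0)).2 + pvDegree es k "from") := by
  induction es generalizing d with
  | nil => simp [pvDegree]
  | cons e es ih =>
    rw [List.foldl_cons, ih _ (by rw [contains_pvStepA]; exact hk),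
      getD_pvStepA d e k hk]
    have hdeg : ∀ ep : String, pvDegree (e :: es) k ep =
        (if pvGetOpt e "type" = some "imports" ∧ pvGetOpt e ep = some k then 1 else 0) +
          pvDegree es k ep := by
      intro ep
      unfold pvDegree
      rw [List.foldl_cons]
      by_cases h : pvGetOpt e "type" = some "imports" ∧ pvGetOpt e ep = some k
      · rw [if_pos h, if_pos h,
          foldl_count_shift (fun e => pvGetOpt e "type" = some "imports" ∧ pvGetOpt e ep = some k)
            es ((0 : Int) + 1)]
        ring
      · simp [h]
    rw [hdeg "to", hdeg "from", Prod.ext_iff]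
    constructor <;> simp <;> ring

theorem keys_foldA (es : List (List (String × String))) (d : PySem.Dict String (Int × Int)) :
    (es.foldl pvStepA d).keys = d.keys := by
  induction es generalizing d with
  | nil => rfl
  | cons e es ih => rw [List.foldl_cons, ih, keys_pvStepA]

-- both ports build their result dict by inserting at key m["id"] a value computed from that key
theorem getD_foldl_insert_id {ν : Type} (l : List (List (String × String)))
    (v : String → ν) (d : PySem.Dict String ν) (k : String) (dflt : ν) :
    (l.foldl (fun d m =>
        d.insert ((pvGetOpt m "id").getD "") (v ((pvGetOpt m "id").getD ""))) d).getD k dflt =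
      if k ∈ l.map (fun m => (pvGetOpt m "id").getD "") then v k else d.getD k dflt := by
  induction l generalizing d with
  | nil => simp
  | cons m l ih =>
    rw [List.foldl_cons, ih]
    by_cases hl : k ∈ l.map (fun m => (pvGetOpt m "id").getD "")
    · simp [List.map_cons, List.mem_cons, hl]
    · by_cases hm : k = (pvGetOpt m "id").getD "" <;>
        simp [List.map_cons, List.mem_cons, PySem.Dict.getD_insert, hl, hm]

-- the whole equivalence, stated on the unfolded port bodies
theorem pv_main (modules edges : List (List (String × String))) :
    (edges.foldl pvStepA
        (modules.foldl (fun d m => d.insert ((pvGetOpt m "id").getD "") ((0 : Int), (0 : Int)))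
          PySem.Dict.empty)).items.map (fun p => (p.1, (p.2.1, p.2.2))) =
    (modules.foldl
      (fun d m =>
        d.insert ((pvGetOpt m "id").getD "")
          (pvDegree edges ((pvGetOpt m "id").getD "") "to",
           pvDegree edges ((pvGetOpt m "id").getD "") "from"))
      PySem.Dict.empty).items := by
  have hkinit :
      (modules.foldl (fun d m => d.insert ((pvGetOpt m "id").getD "") ((0 : Int), (0 : Int)))
        PySem.Dict.empty).keys =
      PySem.Set.update (PySem.Dict.empty (κ := String) (ν := Int × Int)).keys
        (modules.map (fun m => (pvGetOpt m "id").getD "")) :=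
    PySem.Dict.keys_foldl_insert_key modules (fun m => (pvGetOpt m "id").getD "")
      (fun _ _ => ((0 : Int), (0 : Int))) PySem.Dict.empty
  have hndinit :
      (modules.foldl (fun d m => d.insert ((pvGetOpt m "id").getD "") ((0 : Int), (0 : Int)))
        PySem.Dict.empty).keys.Nodup :=
    PySem.Dict.nodup_keys_foldl_insert_key modules (fun m => (pvGetOpt m "id").getD "")
      (fun _ _ => ((0 : Int), (0 : Int))) PySem.Dict.empty PySem.Dict.nodup_keys_empty
  have hkA := keys_foldA edges
    (modules.foldl (fun d m => d.insert ((pvGetOpt m "id").getD "") ((0 : Int), (0 : Int)))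
      PySem.Dict.empty)
  have hndA := hkA ▸ hndinit
  have hkB :
      (modules.foldl
        (fun d m =>
          d.insert ((pvGetOpt m "id").getD "")
            (pvDegree edges ((pvGetOpt m "id").getD "") "to",
             pvDegree edges ((pvGetOpt m "id").getD "") "from"))
        PySem.Dict.empty).keys =
      PySem.Set.update (PySem.Dict.empty (κ := String) (ν := Int × Int)).keys
        (modules.map (fun m => (pvGetOpt m "id").getD "")) :=
    PySem.Dict.keys_foldl_insert_key modules (fun m => (pvGetOpt m "id").getD "") _
      PySem.Dict.empty
  have hndB :
      (modules.foldl
        (fun d m =>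
          d.insert ((pvGetOpt m "id").getD "")
            (pvDegree edges ((pvGetOpt m "id").getD "") "to",
             pvDegree edges ((pvGetOpt m "id").getD "") "from"))
        PySem.Dict.empty).keys.Nodup :=
    PySem.Dict.nodup_keys_foldl_insert_key modules (fun m => (pvGetOpt m "id").getD "") _
      PySem.Dict.empty PySem.Dict.nodup_keys_empty
  rw [PySem.Dict.items_eq_map_keys _ hndA ((0 : Int), (0 : Int)),
    PySem.Dict.items_eq_map_keys _ hndB ((0 : Int), (0 : Int)),
    List.map_map, hkA, hkinit, ← hkB]
  refine List.map_congr_left ?_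
  intro k hkmem
  have hmemmap : k ∈ modules.map (fun m => (pvGetOpt m "id").getD "") := by
    rw [hkB] at hkmem
    exact (PySem.Set.mem_ofList (modules.map (fun m => (pvGetOpt m "id").getD "")) k).mp hkmem
  have hcontains :
      (modules.foldl (fun d m => d.insert ((pvGetOpt m "id").getD "") ((0 : Int), (0 : Int)))
        PySem.Dict.empty).contains k = true := by
    apply (PySem.Dict.contains_iff_mem_keys _ _).mpr
    rw [hkinit]
    exact (PySem.Set.mem_ofList (modules.map (fun m => (pvGetOpt m "id").getD "")) k).mpr hmemmap
  have h0 :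
      (modules.foldl (fun d m => d.insert ((pvGetOpt m "id").getD "") ((0 : Int), (0 : Int)))
        PySem.Dict.empty).getD k ((0 : Int), (0 : Int)) = ((0 : Int), (0 : Int)) := by
    have h := getD_foldl_insert_id modules (fun _ => ((0 : Int), (0 : Int)))
      PySem.Dict.empty k ((0 : Int), (0 : Int))
    exact h.trans (by split_ifs <;> simp)
  have hBval :
      (modules.foldl
        (fun d m =>
          d.insert ((pvGetOpt m "id").getD "")
            (pvDegree edges ((pvGetOpt m "id").getD "") "to",
             pvDegree edges ((pvGetOpt m "id").getD "") "from"))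
        PySem.Dict.empty).getD k ((0 : Int), (0 : Int)) =
      if k ∈ modules.map (fun m => (pvGetOpt m "id").getD "") then
        (pvDegree edges k "to", pvDegree edges k "from")
      else ((0 : Int), (0 : Int)) :=
    getD_foldl_insert_id modules
      (fun i => (pvDegree edges i "to", pvDegree edges i "from"))
      PySem.Dict.empty k ((0 : Int), (0 : Int))
  simp only [Function.comp_apply]
  rw [foldA_getD edges _ k hcontains, h0, hBval, if_pos hmemmap]
  simp

-- ===== VERDICT (by name: the statement is the Claim_ definition above) =====
theorem calculate_fan_in_fan_out_spec : Claim_equal_calculate_fan_in_fan_out := by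
  intro modules edges _ _
  exact pv_main modules edges
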